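-- pv_equiv track=rewrite | github.com/J-M-PUNK/tideway | app/audio/openhome.py | _build_soap_envelope
-- ===== SOURCE A (Python) =====
-- def _xml_escape(value: str) -> str:
--     """Minimal XML text escape for SOAP body argument values. We
--     don't use `xml.sax.saxutils.escape` because that's missing some
--     edge cases (the apostrophe doesn't need escaping in element
--     text, but quotes don't either, and we want to keep the function
--     explicit so tests can pin behaviour). Five-char rule covers
--     everything that matters in element-text context."""
--     return (
--         value.replace("&", "&amp;")
--         .replace("<", "&lt;")
--         .replace(">", "&gt;")
--         .replace('"', "&quot;")
--         .replace("'", "&apos;")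
--     )
--
-- def _build_soap_envelope(
--     service_type: str,
--     action_name: str,
--     args: dict[str, str],
-- ) -> str:
--     """Construct the SOAP envelope sent in the POST body.
--
--     Hand-rolled rather than using a SOAP library because UPnP's SOAP
--     profile is small and predictable, and external libraries
--     (suds-jurko, zeep) all carry surprises around namespace
--     resolution and WSDL generation that don't apply here. Slice 4
--     will pass DIDL-Lite XML as a Metadata argument value, which
--     means we have to XML-escape it — handled by `_xml_escape` below.
--     """
--     arg_xml = "".join(
--         f"<{name}>{_xml_escape(value)}</{name}>"
--         for name, value in args.items()
--     )
--     return (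
--         '<?xml version="1.0" encoding="utf-8"?>'
--         '<s:Envelope xmlns:s="http://schemas.xmlsoap.org/soap/envelope/" '
--         's:encodingStyle="http://schemas.xmlsoap.org/soap/encoding/">'
--         "<s:Body>"
--         f'<u:{action_name} xmlns:u="{service_type}">'
--         f"{arg_xml}"
--         f"</u:{action_name}>"
--         "</s:Body>"
--         "</s:Envelope>"
--     )
-- ===== SOURCE B (Python) =====
-- _ESCAPE = {"&": "&amp;", "<": "&lt;", ">": "&gt;", '"': "&quot;", "'": "&apos;"}
--
--
-- def _xml_escape(value: str) -> str:
--     # single pass: table lookup per character instead of five sequential scans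
--     return "".join(_ESCAPE.get(ch, ch) for ch in value)
--
--
-- def _build_soap_envelope(
--     service_type: str,
--     action_name: str,
--     args: dict,
-- ) -> str:
--     parts = [
--         '<?xml version="1.0" encoding="utf-8"?>'
--         '<s:Envelope xmlns:s="http://schemas.xmlsoap.org/soap/envelope/" '
--         's:encodingStyle="http://schemas.xmlsoap.org/soap/encoding/">'
--         "<s:Body><u:", action_name, ' xmlns:u="', service_type, '">',
--     ]
--     for name, value in args.items():
--         parts.append("<")
--         parts.append(name)
--         parts.append(">")
--         parts.append(_xml_escape(value))
--         parts.append("</")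
--         parts.append(name)
--         parts.append(">")
--     parts.append("</u:")
--     parts.append(action_name)
--     parts.append("></s:Body></s:Envelope>")
--     return "".join(parts)
-- ===== Notes on version B (the rewrite author's own statement) =====
-- stated objective: alternative
-- what changed: B escapes each value in one table-driven pass (dict lookup per character joined once) instead of A's five sequential whole-string replace scans, and assembles the envelope by appending parts to a list joined once instead of nested f-string concatenation.
import Mathlib
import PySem

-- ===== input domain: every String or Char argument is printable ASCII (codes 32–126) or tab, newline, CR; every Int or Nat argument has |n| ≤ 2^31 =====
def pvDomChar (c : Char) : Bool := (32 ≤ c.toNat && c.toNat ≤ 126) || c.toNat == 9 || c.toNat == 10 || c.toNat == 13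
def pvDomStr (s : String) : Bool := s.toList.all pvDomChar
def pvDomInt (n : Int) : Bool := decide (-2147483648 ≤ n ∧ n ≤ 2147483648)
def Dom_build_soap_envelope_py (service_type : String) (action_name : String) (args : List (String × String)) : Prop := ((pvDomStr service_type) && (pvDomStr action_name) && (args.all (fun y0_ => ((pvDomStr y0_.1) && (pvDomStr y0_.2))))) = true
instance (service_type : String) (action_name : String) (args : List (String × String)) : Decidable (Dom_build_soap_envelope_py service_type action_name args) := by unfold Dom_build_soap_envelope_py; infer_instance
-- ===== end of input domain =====

-- B replaces A's five sequential whole-string .replace scans with one table-driven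
-- single pass per value and assembles the envelope by appending parts to a list that
-- is joined once (objective: alternative / idiomatic; same return value everywhere).

-- ===== PORT A =====
-- _xml_escape of A: five chained str.replace scans (PySem.Chars.replace is Python's str.replace)
def xmlEscapeA (cs : List Char) : List Char :=
  PySem.Chars.replace
    (PySem.Chars.replace
      (PySem.Chars.replace
        (PySem.Chars.replace
          (PySem.Chars.replace cs ['&'] "&amp;".toList)
          ['<'] "&lt;".toList)
        ['>'] "&gt;".toList)
      ['"'] "&quot;".toList)
    ['\''] "&apos;".toList

def build_soap_envelope_py (service_type : String) (action_name : String) (args : List (String × String)) : String :=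
  -- arg_xml = "".join(f"<{name}>{_xml_escape(value)}</{name}>" for name, value in args.items())
  let argXml : List Char :=
    PySem.Chars.join []
      (args.map (fun p =>
        "<".toList ++ p.1.toList ++ ">".toList ++ xmlEscapeA p.2.toList
          ++ "</".toList ++ p.1.toList ++ ">".toList))
  String.mk
    (("<?xml version=\"1.0\" encoding=\"utf-8\"?><s:Envelope xmlns:s=\"http://schemas.xmlsoap.org/soap/envelope/\" s:encodingStyle=\"http://schemas.xmlsoap.org/soap/encoding/\"><s:Body>").toList
      ++ "<u:".toList ++ action_name.toList ++ " xmlns:u=\"".toList ++ service_type.toList ++ "\">".toList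
      ++ argXml
      ++ "</u:".toList ++ action_name.toList ++ ">".toList
      ++ "</s:Body>".toList ++ "</s:Envelope>".toList)

-- ===== PORT B =====
-- _ESCAPE table of B (Python dict literal; keys are the single escape-relevant characters)
def xmlEscapeTable : PySem.Dict Char (List Char) :=
  PySem.Dict.mk
    [('&', "&amp;".toList), ('<', "&lt;".toList), ('>', "&gt;".toList),
     ('"', "&quot;".toList), ('\'', "&apos;".toList)]

-- _xml_escape of B: "".join(_ESCAPE.get(ch, ch) for ch in value) — one pass, one lookup per char
def xmlEscapeB (cs : List Char) : List Char :=
  PySem.Chars.join [] (cs.map (fun c => xmlEscapeTable.getD c [c]))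

def build_soap_envelope_py_alt (service_type : String) (action_name : String) (args : List (String × String)) : String :=
  let init : List (List Char) :=
    [("<?xml version=\"1.0\" encoding=\"utf-8\"?><s:Envelope xmlns:s=\"http://schemas.xmlsoap.org/soap/envelope/\" s:encodingStyle=\"http://schemas.xmlsoap.org/soap/encoding/\"><s:Body><u:").toList,
     action_name.toList, " xmlns:u=\"".toList, service_type.toList, "\">".toList]
  let parts : List (List Char) :=
    args.foldl (fun acc p =>
      acc ++ ["<".toList, p.1.toList, ">".toList, xmlEscapeB p.2.toList,
              "</".toList, p.1.toList, ">".toList]) init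
  let parts := parts ++ ["</u:".toList, action_name.toList, "></s:Body></s:Envelope>".toList]
  String.mk (PySem.Chars.join [] parts)

-- ===== PRECONDITION & SPEC =====
def Spec_build_soap_envelope_py (service_type : String) (action_name : String) (args : List (String × String)) (out : String) : Prop := out = build_soap_envelope_py_alt service_type action_name args
instance (service_type : String) (action_name : String) (args : List (String × String)) (out : String) : Decidable (Spec_build_soap_envelope_py service_type action_name args out) := by unfold Spec_build_soap_envelope_py; infer_instance

-- ===== CLAIM (what is proved, stated in full; the proofs are below) =====
def Claim_equal_build_soap_envelope_py : Prop := ∀ (service_type : String) (action_name : String) (args : List (String × String)), Dom_build_soap_envelope_py service_type action_name args → Spec_build_soap_envelope_py service_type action_name args (build_soap_envelope_py service_type action_name args)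

-- ===== LEMMAS AND PROOFS =====

-- str.replace with a single-character pattern is a per-character flatMap
theorem replaceGo_single (c0 : Char) (new : List Char) :
    ∀ (fuel : Nat) (l acc : List Char), l.length ≤ fuel →
      PySem.Chars.replace.go [c0] new fuel l acc
        = acc.reverse ++ l.flatMap (fun c => if c = c0 then new else [c]) := by
  intro fuel
  induction fuel with
  | zero =>
    intro l acc h
    have : l = [] := List.eq_nil_of_length_eq_zero (Nat.le_zero.mp h)
    subst this
    simp [PySem.Chars.replace.go]
  | succ n ih =>
    intro l acc h
    cases l with
    | nil => simp [PySem.Chars.replace.go]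
    | cons c t =>
      by_cases hc : c = c0
      · subst hc
        have hp : List.isPrefixOf [c] (c :: t) = true := by simp [List.isPrefixOf]
        simp only [PySem.Chars.replace.go, hp, if_true]
        rw [ih _ _ (by simpa using Nat.le_of_succ_le_succ h)]
        simp
      · have hp : List.isPrefixOf [c0] (c :: t) = false := by
          simp [List.isPrefixOf]; exact fun a => absurd a.symm hc
        simp only [PySem.Chars.replace.go, hp, if_false, Bool.false_eq_true]
        rw [ih _ _ (Nat.le_of_succ_le_succ h)]
        simp [hc]

theorem replace_single (cs : List Char) (c0 : Char) (new : List Char) :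
    PySem.Chars.replace cs [c0] new = cs.flatMap (fun c => if c = c0 then new else [c]) := by
  rw [PySem.Chars.replace]
  simp [replaceGo_single c0 new cs.length cs [] (le_refl _)]

theorem join_nil_eq_flatten (l : List (List Char)) : PySem.Chars.join [] l = l.flatten := by
  induction l with
  | nil => rfl
  | cons a t ih =>
    simp [PySem.Chars.join, List.intercalate] at ih ⊢
    cases t <;> simp_all

-- per-character agreement of the two escapes, lifted to whole strings
theorem xmlEscape_eq (cs : List Char) : xmlEscapeA cs = xmlEscapeB cs := by
  unfold xmlEscapeA xmlEscapeB
  simp only [replace_single, List.flatMap_assoc, join_nil_eq_flatten,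
    List.flatten_eq_flatMap]
  rw [List.flatMap_map]
  congr 1
  funext c
  by_cases h1 : c = '&'
  · subst h1; rfl
  by_cases h2 : c = '<'
  · subst h2; rfl
  by_cases h3 : c = '>'
  · subst h3; rfl
  by_cases h4 : c = '"'
  · subst h4; rfl
  by_cases h5 : c = '\''
  · subst h5; rfl
  simp [h1, h2, h3, h4, h5, xmlEscapeTable, PySem.Dict.getD, PySem.Dict.get?,
    Ne.symm h1, Ne.symm h2, Ne.symm h3, Ne.symm h4, Ne.symm h5]

-- B's append-to-parts loop, flattened
theorem foldl_parts (args : List (String × String)) (init : List (List Char)) :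
    args.foldl (fun acc p =>
        acc ++ ["<".toList, p.1.toList, ">".toList, xmlEscapeB p.2.toList,
                "</".toList, p.1.toList, ">".toList]) init
      = init ++ args.flatMap (fun p =>
          ["<".toList, p.1.toList, ">".toList, xmlEscapeB p.2.toList,
           "</".toList, p.1.toList, ">".toList]) := by
  induction args generalizing init with
  | nil => simp
  | cons a t ih => simp [List.append_assoc, List.flatMap_def]

theorem flatten_flatMap {A B : Type} (l : List A) (f : A → List (List B)) :
    (l.flatMap f).flatten = l.flatMap (fun x => (f x).flatten) := by
  induction l with
  | nil => rfl
  | cons a t ih => simp [ih]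

-- the two ways the fixed envelope text is split into literals concatenate to the same text
set_option maxRecDepth 8192 in
theorem litHdr (x : List Char) :
    ("<?xml version=\"1.0\" encoding=\"utf-8\"?><s:Envelope xmlns:s=\"http://schemas.xmlsoap.org/soap/envelope/\" s:encodingStyle=\"http://schemas.xmlsoap.org/soap/encoding/\"><s:Body>").toList ++ ("<u:".toList ++ x)
    = ("<?xml version=\"1.0\" encoding=\"utf-8\"?><s:Envelope xmlns:s=\"http://schemas.xmlsoap.org/soap/envelope/\" s:encodingStyle=\"http://schemas.xmlsoap.org/soap/encoding/\"><s:Body><u:").toList ++ x := by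
  rw [← List.append_assoc]; congr 1

theorem litTail :
    ">".toList ++ ("</s:Body>".toList ++ "</s:Envelope>".toList)
    = ("></s:Body></s:Envelope>" : String).toList := by
  decide

-- ===== VERDICT (by name: the statement is the Claim_ definition above) =====
set_option maxRecDepth 8192 in
set_option maxHeartbeats 1000000 in
theorem build_soap_envelope_py_spec : Claim_equal_build_soap_envelope_py := by
  intro service_type action_name args _
  unfold Spec_build_soap_envelope_py build_soap_envelope_py build_soap_envelope_py_alt
  dsimp only
  rw [foldl_parts]
  rw [join_nil_eq_flatten, join_nil_eq_flatten]
  simp only [List.flatten_append, List.flatten_cons, List.flatten_nil, flatten_flatMap]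
  simp only [← List.flatMap_def]
  congr 1
  simp only [xmlEscape_eq, List.append_assoc, List.append_nil]
  rw [litHdr, litTail]
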